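-- pv_equiv track=rewrite | github.com/NeckofNickey/algorithms | dynamic-programming/tricky_sequence.py | get_n_seq
-- ===== SOURCE A (Python) =====
-- def get_n_seq(n):
--
--     n_seq = [0] * (n + 2)
--     n_seq[0] = n_seq[1] = 1
--
--     for i in range(1, n // 2 + 1):
--         if i * 2 <= n + 1:
--             n_seq[i*2] = n_seq[i] + 1
--         if i*2 + 2 <= n + 1:
--             n_seq[i*2 + 2] = n_seq[(i*2 + 2) // 2] + 1
--             n_seq[i*2 + 1] = n_seq[i*2 + 2] + n_seq[i]
--
--     return n_seq[n]
-- ===== SOURCE B (Python) =====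
-- def get_n_seq(n):
--     # O(log n): recurse on the halved index, carrying the consecutive pair (f(k), f(k+1)).
--     def pair(k):
--         if k == 0:
--             return (1, 1)
--         if k == 1:
--             return (1, 2)
--         a, b = pair(k // 2)
--         if k % 2 == 0:
--             return (a + 1, a + b + 1)
--         return (a + b + 1, b + 1)
--     return pair(n)[0]
-- ===== Notes on version B (the rewrite author's own statement) =====
-- stated objective: faster
-- what changed: Replaces the O(n) bottom-up table of size n+2 with an O(log n) recursion on the halved index that carries the consecutive pair (f(k), f(k+1)).
import Mathlib
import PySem

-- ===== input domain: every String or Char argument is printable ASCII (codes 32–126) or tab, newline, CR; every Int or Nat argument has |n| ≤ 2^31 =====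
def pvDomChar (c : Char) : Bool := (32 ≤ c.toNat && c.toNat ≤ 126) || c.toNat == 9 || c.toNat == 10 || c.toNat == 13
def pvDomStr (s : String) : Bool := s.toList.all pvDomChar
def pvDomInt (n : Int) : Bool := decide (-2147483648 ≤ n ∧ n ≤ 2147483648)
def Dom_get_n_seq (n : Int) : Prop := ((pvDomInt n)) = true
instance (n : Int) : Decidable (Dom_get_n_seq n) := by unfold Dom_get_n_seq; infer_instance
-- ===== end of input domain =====

-- B replaces A's O(n) bottom-up table with an O(log n) halved-index recursion carrying the pair (f(k), f(k+1)).

-- ===== PORT A =====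
-- loop body of A's 'for i in range(1, n // 2 + 1)' (reads n_seq[·] via getD; all indices are in range for n ≥ 0)
def stepA (n : Int) (s : List Int) (i : Int) : List Int :=
  let s := if i * 2 ≤ n + 1 then s.set (i * 2).toNat (s.getD i.toNat 0 + 1) else s
  if i * 2 + 2 ≤ n + 1 then
    let s := s.set (i * 2 + 2).toNat (s.getD (PySem.Int.floordiv (i * 2 + 2) 2).toNat 0 + 1)
    s.set (i * 2 + 1).toNat (s.getD (i * 2 + 2).toNat 0 + s.getD i.toNat 0)
  else s

def get_n_seq (n : Int) : Int :=
  let ns : List Int := List.replicate (n + 2).toNat 0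
  let ns := (ns.set 0 1).set 1 1
  let ns := (PySem.List.pyRange 1 (PySem.Int.floordiv n 2 + 1)).foldl (stepA n) ns
  ns.getD n.toNat 0

-- ===== PORT B =====
-- pair k = (f k, f (k+1))
def pairSeq (k : Nat) : Int × Int :=
  if k = 0 then (1, 1)
  else if k = 1 then (1, 2)
  else
    let p := pairSeq (k / 2)
    if k % 2 = 0 then (p.1 + 1, p.1 + p.2 + 1) else (p.1 + p.2 + 1, p.2 + 1)
termination_by k
decreasing_by exact Nat.div_lt_self (by omega) (by omega)

def get_n_seq_alt (n : Int) : Int := (pairSeq n.toNat).1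

-- ===== PRECONDITION & SPEC =====
-- Pre_ excludes exactly n < 0, where Python A raises IndexError while initialising the table.
def Pre_get_n_seq (n : Int) : Prop := 0 ≤ n
instance (n : Int) : Decidable (Pre_get_n_seq n) := by unfold Pre_get_n_seq; infer_instance
def pvWitness_get_n_seq : Int := 5

def Spec_get_n_seq (n : Int) (out : Int) : Prop := out = get_n_seq_alt n
instance (n : Int) (out : Int) : Decidable (Spec_get_n_seq n out) := by unfold Spec_get_n_seq; infer_instance

-- ===== CLAIM (what is proved, stated in full; the proofs are below) =====
def Claim_equal_get_n_seq : Prop := ∀ (n : Int), Dom_get_n_seq n → Pre_get_n_seq n → Spec_get_n_seq n (get_n_seq n)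

-- ===== LEMMAS AND PROOFS =====

-- the mathematical sequence both programs compute
def fseq (k : Nat) : Int :=
  if k ≤ 1 then 1
  else if k % 2 = 0 then fseq (k / 2) + 1
  else fseq (k / 2) + fseq (k / 2 + 1) + 1
termination_by k
decreasing_by all_goals omega

lemma getD_set_self (l : List Int) (k : Nat) (v d : Int) (h : k < l.length) :
    (l.set k v).getD k d = v := by
  simp [List.getD_eq_getElem?_getD, h]

lemma getD_set_ne (l : List Int) (k j : Nat) (v d : Int) (h : k ≠ j) :
    (l.set k v).getD j d = l.getD j d := by
  simp [List.getD_eq_getElem?_getD, List.getElem?_set_ne h]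

lemma fseq_even (k : Nat) (h2 : 2 ≤ k) (he : k % 2 = 0) : fseq k = fseq (k / 2) + 1 := by
  rw [fseq]; simp [Nat.not_le.mpr (by omega : 1 < k), he]

lemma fseq_zero : fseq 0 = 1 := by rw [fseq]; norm_num
lemma fseq_one : fseq 1 = 1 := by rw [fseq]; norm_num
lemma fseq_two : fseq 2 = 2 := by rw [fseq_even 2 le_rfl rfl, fseq_one]; norm_num

lemma fseq_odd (k : Nat) (h2 : 2 ≤ k) (ho : k % 2 = 1) :
    fseq k = fseq (k / 2) + fseq (k / 2 + 1) + 1 := by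
  rw [fseq]; simp [Nat.not_le.mpr (by omega : 1 < k), ho]

lemma pairSeq_eq (k : Nat) : pairSeq k = (fseq k, fseq (k + 1)) := by
  induction k using Nat.strong_induction_on with
  | _ k ih =>
    rw [pairSeq]
    by_cases h0 : k = 0
    · subst h0; simp [fseq_zero, fseq_one]
    · by_cases h1 : k = 1
      · subst h1; simp [fseq_one, fseq_two]
      · simp only [h0, h1, if_false]
        rw [ih (k / 2) (by omega)]
        by_cases he : k % 2 = 0
        · rw [if_pos he,
              fseq_even k (by omega) he,
              fseq_odd (k + 1) (by omega) (by omega),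
              (by omega : (k + 1) / 2 = k / 2)]
        · have ho : k % 2 = 1 := by omega
          rw [if_neg he,
              fseq_odd k (by omega) ho,
              fseq_even (k + 1) (by omega) (by omega),
              (by omega : (k + 1) / 2 = k / 2 + 1)]

-- loop invariant for A's table: after i iterations all entries up to min (2*i+1) N hold fseq
lemma step_inv (N i : Nat) (him : i + 1 ≤ N / 2) (L : List Int)
    (hlen : L.length = N + 2)
    (hinv : ∀ j : Nat, j ≤ min (2 * i + 1) N → L.getD j 0 = fseq j) :
    (stepA (N : Int) L ((i : Int) + 1)).length = N + 2 ∧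
    ∀ j : Nat, j ≤ min (2 * (i + 1) + 1) N →
      (stepA (N : Int) L ((i : Int) + 1)).getD j 0 = fseq j := by
  have hN : 2 * (i + 1) ≤ N := by omega
  have hc1 : ((i : Int) + 1) * 2 ≤ (N : Int) + 1 := by omega
  have htoNat1 : (((i : Int) + 1) * 2).toNat = 2 * (i + 1) := by omega
  have htoNatI : ((i : Int) + 1).toNat = i + 1 := by omega
  have hLi : L.getD (i + 1) 0 = fseq (i + 1) := hinv _ (by omega)
  have hset1len : (L.set (2 * (i + 1)) (fseq (i + 1) + 1)).length = N + 2 := by simp [hlen]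
  have hval1 : fseq (i + 1) + 1 = fseq (2 * (i + 1)) := by
    rw [fseq_even (2 * (i + 1)) (by omega) (by omega), Nat.mul_div_cancel_left _ (by norm_num)]
  unfold stepA
  dsimp only
  rw [if_pos hc1, htoNat1, htoNatI, hLi]
  by_cases hc2 : ((i : Int) + 1) * 2 + 2 ≤ (N : Int) + 1
  · rw [if_pos hc2]
    have hc2' : 2 * (i + 1) + 2 ≤ N + 1 := by omega
    have hdiv : (PySem.Int.floordiv (((i : Int) + 1) * 2 + 2) 2).toNat = i + 2 := by
      rw [PySem.Int.floordiv_eq_ediv_of_pos (by norm_num)]; omega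
    have htoNat2 : (((i : Int) + 1) * 2 + 2).toNat = 2 * (i + 1) + 2 := by omega
    have htoNat3 : (((i : Int) + 1) * 2 + 1).toNat = 2 * (i + 1) + 1 := by omega
    rw [hdiv, htoNat2, htoNat3]
    set L1 := L.set (2 * (i + 1)) (fseq (i + 1) + 1) with hL1
    have hread2 : L1.getD (i + 2) 0 = fseq (i + 2) := by
      by_cases hi1 : i = 0
      · subst hi1
        rw [hL1]
        have h22 : (2 : Nat) * (0 + 1) = 0 + 2 := by norm_num
        rw [h22, getD_set_self _ _ _ _ (by simp [hlen]; omega), hval1, h22]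
      · rw [hL1, getD_set_ne _ _ _ _ _ (by omega)]
        exact hinv _ (by omega)
    rw [hread2]
    have hval2 : fseq (i + 2) + 1 = fseq (2 * (i + 1) + 2) := by
      rw [fseq_even (2 * (i + 1) + 2) (by omega) (by omega), (by omega : (2 * (i + 1) + 2) / 2 = i + 2)]
    set L2 := L1.set (2 * (i + 1) + 2) (fseq (i + 2) + 1) with hL2
    have hL2len : L2.length = N + 2 := by simp [hL2, hL1, hlen]
    have hread3 : L2.getD (2 * (i + 1) + 2) 0 = fseq (2 * (i + 1) + 2) := by
      rw [hL2, getD_set_self _ _ _ _ (by simp [hL1, hlen]; omega), hval2]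
    have hread4 : L2.getD (i + 1) 0 = fseq (i + 1) := by
      rw [hL2, getD_set_ne _ _ _ _ _ (by omega), hL1, getD_set_ne _ _ _ _ _ (by omega), hLi]
    rw [hread3, hread4]
    constructor
    · simp [hL2len]
    · intro j hj
      have hval3 : fseq (2 * (i + 1) + 2) + fseq (i + 1) = fseq (2 * (i + 1) + 1) := by
        rw [fseq_odd (2 * (i + 1) + 1) (by omega) (by omega),
            (by omega : (2 * (i + 1) + 1) / 2 = i + 1), ← hval2,
            (show i + 1 + 1 = i + 2 from rfl)]
        ring
      by_cases hj1 : j = 2 * (i + 1) + 1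
      · subst hj1
        rw [getD_set_self _ _ _ _ (by omega), hval3]
      · rw [getD_set_ne _ _ _ _ _ (by omega)]
        by_cases hj2 : j = 2 * (i + 1)
        · subst hj2
          rw [hL2, getD_set_ne _ _ _ _ _ (by omega), hL1, getD_set_self _ _ _ _ (by omega), hval1]
        · rw [hL2, getD_set_ne _ _ _ _ _ (by omega), hL1, getD_set_ne _ _ _ _ _ (by omega)]
          exact hinv _ (by omega)
  · rw [if_neg hc2]
    have hNeq : N = 2 * (i + 1) := by omega
    constructor
    · simp [hlen]
    · intro j hj
      by_cases hj2 : j = 2 * (i + 1)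
      · subst hj2; rw [getD_set_self _ _ _ _ (by omega), hval1]
      · rw [getD_set_ne _ _ _ _ _ (by omega)]
        exact hinv _ (by omega)

lemma loop_inv (N i : Nat) (hi : i ≤ N / 2) :
    ((PySem.List.pyRange 1 ((i : Int) + 1)).foldl (stepA (N : Int))
        (((List.replicate (N + 2) (0 : Int)).set 0 1).set 1 1)).length = N + 2 ∧
    ∀ j : Nat, j ≤ min (2 * i + 1) N →
      ((PySem.List.pyRange 1 ((i : Int) + 1)).foldl (stepA (N : Int))
        (((List.replicate (N + 2) (0 : Int)).set 0 1).set 1 1)).getD j 0 = fseq j := by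
  induction i with
  | zero =>
    have h1 : PySem.List.pyRange (1 : Int) (((0 : Nat) : Int) + 1) = [] := by decide
    rw [h1, List.foldl_nil]
    refine ⟨by simp, ?_⟩
    intro j hj
    have hj' : j = 0 ∨ j = 1 := by omega
    rcases hj' with h | h <;> subst h
    · rw [getD_set_ne _ _ _ _ _ (by omega), getD_set_self _ _ _ _ (by simp), fseq_zero]
    · rw [getD_set_self _ _ _ _ (by simp), fseq_one]
  | succ i ih =>
    have hrange : PySem.List.pyRange 1 (((i + 1 : Nat) : Int) + 1) =
        PySem.List.pyRange 1 ((i : Int) + 1) ++ [(i : Int) + 1] := by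
      push_cast
      exact PySem.List.pyRange_one_succ_right (by omega)
    rw [hrange, List.foldl_append, List.foldl_cons, List.foldl_nil]
    obtain ⟨h1, h2⟩ := ih (by omega)
    have hstep := step_inv N i (by omega) _ h1 h2
    exact ⟨hstep.1, fun j hj => hstep.2 j hj⟩

-- ===== VERDICT (by name: the statement is the Claim_ definition above) =====
theorem get_n_seq_spec : Claim_equal_get_n_seq := by
  intro n _ hpre
  lift n to ℕ using hpre with N
  unfold Spec_get_n_seq get_n_seq get_n_seq_alt
  dsimp only
  have hfd : PySem.Int.floordiv (N : Int) 2 = ((N / 2 : Nat) : Int) := by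
    exact_mod_cast PySem.Int.floordiv_natCast N 2
  have hrep : ((N : Int) + 2).toNat = N + 2 := by omega
  have hinv := loop_inv N (N / 2) le_rfl
  rw [hfd, hrep, pairSeq_eq, Int.toNat_natCast]
  exact hinv.2 N (by omega)
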